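-- pv_equiv track=rewrite | github.com/Kavis1/enhanced-marzban | app/services/adblock_manager.py | _domain_in_set
-- ===== SOURCE A (Python) =====
-- from typing import Dict, List, Set, Optional
--
-- def _domain_in_set(domain: str, domain_set: Set[str]) -> bool:
--     """Check if domain matches any domain in set (supports wildcards)"""
--     if domain in domain_set:
--         return True
--
--     # Check for wildcard matches
--     domain_parts = domain.split('.')
--     for i in range(len(domain_parts)):
--         wildcard_domain = '*.' + '.'.join(domain_parts[i:])
--         if wildcard_domain in domain_set:
--             return True
--
--     return False
-- ===== SOURCE B (Python) =====
-- def _domain_in_set(domain: str, domain_set) -> bool: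
--     """Check if domain matches any domain in set (supports wildcards)"""
--     if domain in domain_set:
--         return True
--     for entry in domain_set:
--         if entry.startswith('*.'):
--             suffix = entry[2:]
--             if domain == suffix or domain.endswith('.' + suffix):
--                 return True
--     return False
-- ===== Notes on version B (the rewrite author's own statement) =====
-- stated objective: alternative
-- what changed: Instead of generating every '*.'+'.'.join(parts[i:]) candidate string from the domain and hashing each into the set, B scans the set's entries once and matches each '*.'-entry against the domain by string suffix comparison (domain == suffix or domain.endswith('.'+suffix)).
import Mathlib
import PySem

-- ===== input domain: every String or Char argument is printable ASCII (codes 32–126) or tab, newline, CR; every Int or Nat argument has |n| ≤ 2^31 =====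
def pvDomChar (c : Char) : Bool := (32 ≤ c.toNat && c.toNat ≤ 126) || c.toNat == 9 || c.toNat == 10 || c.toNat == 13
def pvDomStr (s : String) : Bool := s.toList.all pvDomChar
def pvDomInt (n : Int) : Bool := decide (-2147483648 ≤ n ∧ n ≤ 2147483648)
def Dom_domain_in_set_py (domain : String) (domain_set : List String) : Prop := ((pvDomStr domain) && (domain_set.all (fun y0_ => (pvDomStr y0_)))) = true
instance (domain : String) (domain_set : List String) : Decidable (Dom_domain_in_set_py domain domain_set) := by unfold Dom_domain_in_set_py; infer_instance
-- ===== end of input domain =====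

-- B scans the set's entries and matches each '*.'-entry against the domain by string suffix
-- comparison, instead of A's generation of one '*.'+'.'.join(parts[i:]) candidate per label
-- boundary and hashing each into the set (objective: alternative; return values are equal).

-- ===== PORT A =====
-- A's loop 'for i in range(len(domain_parts)): if wildcard_domain in domain_set: return True'
-- is the short-circuiting any over range(len(domain_parts)); domain.split('.') is Chars.splitOn.
def domain_in_set_py (domain : String) (domain_set : List String) : Bool :=
  if PySem.Set.contains domain_set domain then true
  else
    let domain_parts : List (List Char) := PySem.Chars.splitOn domain.toList ['.']
    (PySem.List.pyRange 0 (domain_parts.length : Int)).any fun i =>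
      let wildcard_domain : String :=
        String.ofList ('*' :: '.' :: PySem.Chars.join ['.'] (PySem.List.slice domain_parts (some i) none))
      PySem.Set.contains domain_set wildcard_domain

-- ===== PORT B =====
-- B's loop 'for entry in domain_set: …' with early return True is the short-circuiting any
-- over the set's element list (the result is membership-like, independent of iteration order).
def domain_in_set_py_alt (domain : String) (domain_set : List String) : Bool :=
  if PySem.Set.contains domain_set domain then true
  else
    domain_set.any fun entry =>
      PySem.Str.startswith entry "*." &&
        (let suffix := PySem.Str.slice entry (some 2) none
         (domain == suffix || PySem.Str.endswith domain ("." ++ suffix)))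

-- ===== PRECONDITION & SPEC =====
def Spec_domain_in_set_py (domain : String) (domain_set : List String) (out : Bool) : Prop := out = domain_in_set_py_alt domain domain_set
instance (domain : String) (domain_set : List String) (out : Bool) : Decidable (Spec_domain_in_set_py domain domain_set out) := by unfold Spec_domain_in_set_py; infer_instance

-- ===== CLAIM (what is proved, stated in full; the proofs are below) =====
def Claim_equal_domain_in_set_py : Prop := ∀ (domain : String) (domain_set : List String), Dom_domain_in_set_py domain domain_set → Spec_domain_in_set_py domain domain_set (domain_in_set_py domain domain_set)

-- ===== LEMMAS AND PROOFS =====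

-- A clean structural recursion computing Chars.splitOn · ['.'] (proof helper only).
def splitDot : List Char → List (List Char)
  | [] => [[]]
  | c :: rest =>
      if c = '.' then [] :: splitDot rest
      else (splitDot rest).modifyHead (c :: ·)

theorem splitDot_ne_nil (l : List Char) : splitDot l ≠ [] := by
  cases l with
  | nil => simp [splitDot]
  | cons c rest =>
      simp only [splitDot]
      split
      · simp
      · intro h
        have := splitDot_ne_nil rest
        cases hr : splitDot rest with
        | nil => exact this hr
        | cons p ps => rw [hr] at h; simp at h

theorem splitOn_go_eq (fuel : Nat) (l cur : List Char) (acc : List (List Char))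
    (h : l.length < fuel) :
    PySem.Chars.splitOn.go ['.'] fuel l cur acc
      = acc.reverse ++ (splitDot l).modifyHead (cur.reverse ++ ·) := by
  induction fuel generalizing l cur acc with
  | zero => omega
  | succ fuel ih =>
      cases l with
      | nil => simp [PySem.Chars.splitOn.go, splitDot]
      | cons c rest =>
          simp only [PySem.Chars.splitOn.go]
          by_cases hc : c = '.'
          · subst hc
            rw [if_pos (by simp [List.isPrefixOf])]
            have hd : List.drop (['.'] : List Char).length ('.' :: rest) = rest := rfl
            rw [hd, ih rest [] (cur.reverse :: acc) (by simp at h ⊢; omega)]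
            simp [splitDot]
            exact congrFun List.modifyHead_id (splitDot rest)
          · rw [if_neg (by simp [List.isPrefixOf]; exact fun h' => hc h'.symm)]
            rw [ih rest (c :: cur) acc (by simp at h ⊢; omega)]
            cases hr : splitDot rest with
            | nil => exact absurd hr (splitDot_ne_nil rest)
            | cons p ps => simp [splitDot, hc, hr]

theorem splitOn_dot (l : List Char) :
    PySem.Chars.splitOn l ['.'] = splitDot l := by
  rw [PySem.Chars.splitOn, splitOn_go_eq l.length.succ l [] [] (Nat.lt_succ_self _)]
  cases h : splitDot l with
  | nil => exact absurd h (splitDot_ne_nil l)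
  | cons p ps => simp

theorem join_splitDot (l : List Char) :
    PySem.Chars.join ['.'] (splitDot l) = l := by
  induction l with
  | nil => simp [splitDot, PySem.Chars.join_singleton]
  | cons c rest ih =>
      by_cases hc : c = '.'
      · subst hc
        have h1 : splitDot ('.' :: rest) = [] :: splitDot rest := by simp [splitDot]
        cases hr : splitDot rest with
        | nil => exact absurd hr (splitDot_ne_nil rest)
        | cons p ps =>
            rw [h1, hr, PySem.Chars.join_cons_cons]
            rw [hr] at ih
            simp [ih]
      · have h1 : splitDot (c :: rest) = (splitDot rest).modifyHead (c :: ·) := by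
          simp [splitDot, hc]
        cases hr : splitDot rest with
        | nil => exact absurd hr (splitDot_ne_nil rest)
        | cons p ps =>
            rw [hr] at ih
            rw [h1, hr, List.modifyHead]
            cases ps with
            | nil =>
                rw [PySem.Chars.join_singleton] at ih ⊢
                rw [ih]
            | cons q qs =>
                rw [PySem.Chars.join_cons_cons] at ih ⊢
                rw [← ih]
                simp

theorem splitDot_append (p s : List Char) :
    splitDot (p ++ '.' :: s) = splitDot p ++ splitDot s := by
  induction p with
  | nil => simp [splitDot]
  | cons c rest ih =>
      by_cases hc : c = '.'
      · subst hc; simp [splitDot, ih]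
      · simp only [List.cons_append, splitDot, if_neg hc, ih]
        cases hr : splitDot rest with
        | nil => exact absurd hr (splitDot_ne_nil rest)
        | cons q qs => simp

theorem join_cons_append (a : List Char) (as bs : List (List Char)) (hb : bs ≠ []) :
    PySem.Chars.join ['.'] ((a :: as) ++ bs)
      = PySem.Chars.join ['.'] (a :: as) ++ '.' :: PySem.Chars.join ['.'] bs := by
  induction as generalizing a with
  | nil =>
      cases bs with
      | nil => exact absurd rfl hb
      | cons b bs' =>
          rw [List.cons_append, List.nil_append, PySem.Chars.join_cons_cons,
              PySem.Chars.join_singleton]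
          simp
  | cons a' as' ih =>
      rw [List.cons_append, List.cons_append, PySem.Chars.join_cons_cons]
      rw [show a' :: (as' ++ bs) = (a' :: as') ++ bs from rfl, ih a',
          PySem.Chars.join_cons_cons]
      simp

-- one entry matches one of A's generated wildcard candidates iff B's suffix test accepts it
theorem entry_iff (dl el : List Char) :
    (∃ j : Nat, j < (splitDot dl).length ∧
        el = '*' :: '.' :: PySem.Chars.join ['.'] ((splitDot dl).drop j))
      ↔ (['*', '.'] <+: el ∧ (dl = el.drop 2 ∨ ('.' :: el.drop 2) <:+ dl)) := by
  constructor
  · rintro ⟨j, hj, rfl⟩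
    refine ⟨⟨_, rfl⟩, ?_⟩
    simp only [List.drop_succ_cons, List.drop_zero]
    cases j with
    | zero => left; rw [List.drop_zero, join_splitDot]
    | succ j' =>
        right
        have hdrop : (splitDot dl).drop (j' + 1) ≠ [] := by
          intro h
          have := List.drop_eq_nil_iff.mp h
          omega
        cases htake : (splitDot dl).take (j' + 1) with
        | nil =>
            have hnil : splitDot dl = [] := by
              cases hsd : splitDot dl with
              | nil => rfl
              | cons p ps => rw [hsd] at htake; simp at htake
            exact absurd hnil (splitDot_ne_nil dl)
        | cons p ps =>
            refine ⟨PySem.Chars.join ['.'] (p :: ps), ?_⟩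
            conv_rhs => rw [← join_splitDot dl,
              ← List.take_append_drop (j' + 1) (splitDot dl), htake]
            rw [join_cons_append _ _ _ hdrop]
  · rintro ⟨⟨t, rfl⟩, hcase⟩
    simp only [List.cons_append, List.nil_append, List.drop_succ_cons, List.drop_zero] at hcase
    rcases hcase with h | ⟨p, hp⟩
    · refine ⟨0, List.length_pos_of_ne_nil (splitDot_ne_nil dl), ?_⟩
      rw [List.drop_zero, join_splitDot, h]
      rfl
    · refine ⟨(splitDot p).length, ?_, ?_⟩
      · rw [← hp, splitDot_append, List.length_append]
        have := List.length_pos_of_ne_nil (splitDot_ne_nil t)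
        omega
      · rw [← hp, splitDot_append, List.drop_left, join_splitDot]
        rfl

-- B's per-entry test, stated on the underlying character lists
theorem bpred_iff (domain entry : String) :
    ((PySem.Str.startswith entry "*." &&
        (let suffix := PySem.Str.slice entry (some 2) none
         (domain == suffix || PySem.Str.endswith domain ("." ++ suffix)))) = true)
      ↔ (['*', '.'] <+: entry.toList ∧
          (domain.toList = entry.toList.drop 2 ∨
            ('.' :: entry.toList.drop 2) <:+ domain.toList)) := by
  have hslice : (PySem.Str.slice entry (some 2) none).toList = entry.toList.drop 2 := by
    rw [PySem.Str.toList_slice, PySem.Chars.slice_eq_listSlice,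
      PySem.List.slice_from _ (by norm_num : (0:Int) ≤ 2)]
    rfl
  have hdot : (("." : String) ++ PySem.Str.slice entry (some 2) none).toList
      = '.' :: entry.toList.drop 2 := by
    rw [String.toList_append, hslice]
    rfl
  rw [Bool.and_eq_true, Bool.or_eq_true, beq_iff_eq,
    PySem.Str.startswith_eq, PySem.Chars.startswith_iff,
    PySem.Str.endswith_eq, PySem.Chars.endswith_iff, hdot,
    show ("*." : String).toList = ['*', '.'] from rfl,
    ← String.toList_inj, hslice]

-- the two loops compute the same Bool
theorem anys_eq (domain : String) (domain_set : List String) :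
    ((PySem.List.pyRange 0 ((PySem.Chars.splitOn domain.toList ['.']).length : Int)).any fun i =>
        PySem.Set.contains domain_set
          (String.ofList ('*' :: '.' :: PySem.Chars.join ['.']
            (PySem.List.slice (PySem.Chars.splitOn domain.toList ['.']) (some i) none))))
      = domain_set.any fun entry =>
          PySem.Str.startswith entry "*." &&
            (let suffix := PySem.Str.slice entry (some 2) none
             (domain == suffix || PySem.Str.endswith domain ("." ++ suffix))) := by
  apply Bool.coe_iff_coe.mp
  rw [splitOn_dot]
  simp only [List.any_eq_true, PySem.Set.contains, List.contains_iff_mem,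
    PySem.List.mem_pyRange_one, bpred_iff]
  constructor
  · rintro ⟨i, ⟨hi0, hin⟩, hmem⟩
    rw [PySem.List.slice_from _ hi0] at hmem
    refine ⟨_, hmem, (entry_iff domain.toList _).mp ⟨i.toNat, by omega, ?_⟩⟩
    rw [String.toList_ofList]
  · rintro ⟨e, he, hprop⟩
    obtain ⟨j, hj, hje⟩ := (entry_iff domain.toList e.toList).mpr hprop
    refine ⟨(j : Int), ⟨Int.natCast_nonneg j, by exact_mod_cast hj⟩, ?_⟩
    rw [PySem.List.slice_from_natCast]
    have he2 : e = String.ofList ('*' :: '.' ::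
        PySem.Chars.join ['.'] ((splitDot domain.toList).drop j)) := by
      apply String.toList_inj.mp
      rw [String.toList_ofList, hje]
    rwa [← he2]

-- ===== VERDICT (by name: the statement is the Claim_ definition above) =====
theorem domain_in_set_py_spec : Claim_equal_domain_in_set_py := by
  intro domain domain_set _
  unfold Spec_domain_in_set_py domain_in_set_py domain_in_set_py_alt
  split
  · rfl
  · exact anys_eq domain domain_set
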